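-- pv_equiv track=rewrite | github.com/prjailani/IEC_61131-3_Code_Generator | backend/validator.py | split_top
-- ===== SOURCE A (Python) =====
-- from typing import List, Dict, Tuple, Any, Optional
--
-- def split_top(expr: str, ops: List[str]) -> Optional[Tuple[str, str, str]]:
--     """Split expr at the rightmost top-level operator among ops (token-aware).
--     Returns (left, op, right) or None.
--     """
--     e = expr
--     depth_p = depth_b = 0
--     i = len(e) - 1
--
--     def is_boundary(idx: int, length: int) -> bool:
--         start = idx - length + 1
--         before = e[start-1] if start-1 >= 0 else ""
--         after = e[idx+1] if idx+1 < len(e) else ""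
--         def is_id_char(ch: str) -> bool:
--             return ch.isalnum() or ch == "_"
--
--         if is_id_char(before):
--             return False
--
--         if is_id_char(after):
--             return False
--
--         if before == ':' or after == ':':
--             return False
--         return True
--
--     while i >= 0:
--         ch = e[i]
--         if ch == ')': depth_p += 1; i -= 1; continue
--         if ch == '(': depth_p -= 1; i -= 1; continue
--         if ch == ']': depth_b += 1; i -= 1; continue
--         if ch == '[': depth_b -= 1; i -= 1; continue
--         if depth_p == 0 and depth_b == 0:
--             for op in sorted(ops, key=len, reverse=True):
--                 L = len(op)
--                 start = i - L + 1
--                 if start >= 0 and e[start:i+1].upper() == op and is_boundary(i, L):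
--                     left = e[:start].strip()
--                     right = e[i+1:].strip()
--                     return left, op.strip(), right
--         i -= 1
--     return None
-- ===== SOURCE B (Python) =====
-- from typing import List, Optional, Tuple
--
-- def split_top(expr: str, ops: List[str]) -> Optional[Tuple[str, str, str]]:
--     """Staged: (1) precompute a boolean top-level mask in one pass, (2) for each
--     operator (longest first) scan its match end-positions on the uppercased string,
--     (3) keep the globally best candidate (strictly rightmost end wins; at equal end
--     the earlier operator in longest-first order is kept)."""
--     e = expr
--     n = len(e)
--     E = e.upper()
--
--     # stage 1: top[i] is True iff e[i] is a non-bracket character at top level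
--     top = [False] * n
--     dp = db = 0
--     for i in range(n - 1, -1, -1):
--         c = e[i]
--         if c == ')':
--             dp += 1
--         elif c == '(':
--             dp -= 1
--         elif c == ']':
--             db += 1
--         elif c == '[':
--             db -= 1
--         elif dp == 0 and db == 0:
--             top[i] = True
--
--     def is_id_char(ch: str) -> bool:
--         return ch.isalnum() or ch == "_"
--
--     # stages 2+3: per operator, scan end positions; keep the rightmost candidate
--     best = None  # (start, i, op)
--     for op in sorted(ops, key=len, reverse=True):
--         L = len(op)
--         for i in range(n):
--             start = i - L + 1
--             if start >= 0 and top[i] and E.startswith(op, start):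
--                 before = e[start - 1] if start - 1 >= 0 else ""
--                 after = e[i + 1] if i + 1 < n else ""
--                 if not (is_id_char(before) or is_id_char(after)
--                         or before == ':' or after == ':'):
--                     if best is None or i > best[1]:
--                         best = (start, i, op)
--     if best is None:
--         return None
--     start, i, op = best
--     return e[:start].strip(), op.strip(), e[i + 1:].strip()
-- ===== Notes on version B (the rewrite author's own statement) =====
-- stated objective: alternative
-- what changed: Replaced A's single right-to-left depth-tracked scan with early return and per-position operator trials by a staged pipeline: one pass precomputes a boolean top-level mask, then the loop nesting is inverted (each operator, longest first, scans its match end-positions on the uppercased string via startswith), and a global best candidate is kept where a strictly rightmost end overwrites and ties keep the earlier operator.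
import Mathlib
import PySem

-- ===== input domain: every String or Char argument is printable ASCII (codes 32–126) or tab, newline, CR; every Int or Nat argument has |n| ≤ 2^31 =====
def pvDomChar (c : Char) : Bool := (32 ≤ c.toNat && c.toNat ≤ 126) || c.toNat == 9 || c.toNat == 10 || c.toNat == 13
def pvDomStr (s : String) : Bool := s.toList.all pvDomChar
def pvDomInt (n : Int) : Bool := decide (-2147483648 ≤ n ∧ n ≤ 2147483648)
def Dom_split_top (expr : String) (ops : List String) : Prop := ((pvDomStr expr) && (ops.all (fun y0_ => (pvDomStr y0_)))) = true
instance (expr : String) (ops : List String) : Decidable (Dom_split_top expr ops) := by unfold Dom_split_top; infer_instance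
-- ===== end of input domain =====

-- B is a staged re-implementation: it precomputes a boolean top-level mask, then searches
-- per operator over end positions on the uppercased string, keeping the rightmost global
-- candidate, instead of A's right-to-left depth-tracked scan with per-position operator
-- trials and early return (objective: alternative decomposition, same exact result).

-- shared helper: Python's is_id_char applied to a one-char-or-empty string (Option Char)
def pvIdOpt (oc : Option Char) : Bool :=
  match oc with
  | some c => PySem.Chars.isalnum c || c == '_'
  | none => false

-- ===== PORT A =====
def pvIsBoundaryA (e : List Char) (idx L : Nat) : Bool :=
  -- called only with L ≤ idx + 1 (Python start ≥ 0)
  let start := idx + 1 - L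
  let before : Option Char := if 1 ≤ start then e[start - 1]? else none
  let after : Option Char := e[idx + 1]?
  if pvIdOpt before then false
  else if pvIdOpt after then false
  else if before == some ':' || after == some ':' then false
  else true

def pvFindOpA (e : List Char) (i : Nat) : List (List Char) → Option (Nat × List Char)
  | [] => none
  | op :: rest =>
    let L := op.length
    if L ≤ i + 1 ∧ PySem.Chars.upper (PySem.List.slice e (some ((i : Int) - L + 1)) (some ((i : Int) + 1))) = op ∧ pvIsBoundaryA e i L = true then
      some (i + 1 - L, op)
    else pvFindOpA e i rest

def pvMkResA (e : List Char) (start i : Nat) (op : List Char) : List Char × List Char × List Char :=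
  (PySem.Chars.strip (e.take start), PySem.Chars.strip op, PySem.Chars.strip (e.drop (i + 1)))

def pvGoA (e : List Char) (ops : List (List Char)) : Int → Int → Nat → Option (List Char × List Char × List Char)
  | _, _, 0 => none
  | dp, db, fuel + 1 =>
    let i := fuel
    let ch := e.getD i ' '
    if ch = ')' then pvGoA e ops (dp + 1) db fuel
    else if ch = '(' then pvGoA e ops (dp - 1) db fuel
    else if ch = ']' then pvGoA e ops dp (db + 1) fuel
    else if ch = '[' then pvGoA e ops dp (db - 1) fuel
    else if dp = 0 ∧ db = 0 then
      match pvFindOpA e i (PySem.List.sorted ops (fun op => op.length) true) with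
      | some (start, op) => some (pvMkResA e start i op)
      | none => pvGoA e ops dp db fuel
    else pvGoA e ops dp db fuel

def split_top (expr : String) (ops : List String) : Option (String × String × String) :=
  let e := expr.toList
  match pvGoA e (ops.map String.toList) 0 0 e.length with
  | none => none
  | some (l, o, r) => some (String.ofList l, String.ofList o, String.ofList r)

-- ===== PORT B =====
-- stage 1: e[i] scanned right to left, pushing the mask entry for index i in front
def pvMaskGo (e : List Char) : Nat → Int → Int → List Bool → List Bool
  | 0, _, _, acc => acc
  | k + 1, dp, db, acc =>
    let c := e.getD k ' '
    if c = ')' then pvMaskGo e k (dp + 1) db (false :: acc)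
    else if c = '(' then pvMaskGo e k (dp - 1) db (false :: acc)
    else if c = ']' then pvMaskGo e k dp (db + 1) (false :: acc)
    else if c = '[' then pvMaskGo e k dp (db - 1) (false :: acc)
    else pvMaskGo e k dp db ((decide (dp = 0) && decide (db = 0)) :: acc)

-- B's boundary test (the not-any-of form Source B uses)
def pvBdyB (e : List Char) (start i : Nat) : Bool :=
  let before : Option Char := if 1 ≤ start then e[start - 1]? else none
  let after : Option Char := if i + 1 < e.length then e[i + 1]? else none
  !(pvIdOpt before || pvIdOpt after || before == some ':' || after == some ':')

-- stage 2: scan end positions i = 0..n-1 for one operator, keeping a strictly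
-- righter candidate ('E.startswith(op, start)' with start ≥ 0 is exactly
-- 'op' being a prefix of E from position start, i.e. startswith on E.drop start)
def pvScanOp (e E : List Char) (top : List Bool) (op : List Char) :
    Nat → Option (Nat × Nat × List Char) → Nat → Option (Nat × Nat × List Char)
  | _, best, 0 => best
  | i, best, rem + 1 =>
    pvScanOp e E top op (i + 1)
      (if op.length ≤ i + 1 ∧ top.getD i false = true ∧ PySem.Chars.startswith (E.drop (i + 1 - op.length)) op = true then
        if pvBdyB e (i + 1 - op.length) i then
          match best with
          | none => some (i + 1 - op.length, i, op)
          | some (_, bi, _) => if bi < i then some (i + 1 - op.length, i, op) else best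
        else best
      else best) rem

-- stage 3: fold over the operators, longest first
def pvFoldOps (e E : List Char) (top : List Bool) :
    List (List Char) → Option (Nat × Nat × List Char) → Option (Nat × Nat × List Char)
  | [], best => best
  | op :: rest, best => pvFoldOps e E top rest (pvScanOp e E top op 0 best e.length)

def split_top_alt (expr : String) (ops : List String) : Option (String × String × String) :=
  let e := expr.toList
  let E := PySem.Chars.upper e
  let top := pvMaskGo e e.length 0 0 []
  match pvFoldOps e E top (PySem.List.sorted (ops.map String.toList) (fun op => op.length) true) none with
  | none => none
  | some (start, i, op) =>
    some (String.ofList (PySem.Chars.strip (e.take start)),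
          String.ofList (PySem.Chars.strip op),
          String.ofList (PySem.Chars.strip (e.drop (i + 1))))

-- ===== PRECONDITION & SPEC =====
def Spec_split_top (expr : String) (ops : List String) (out : Option (String × String × String)) : Prop := out = split_top_alt expr ops
instance (expr : String) (ops : List String) (out : Option (String × String × String)) : Decidable (Spec_split_top expr ops out) := by unfold Spec_split_top; infer_instance

-- ===== CLAIM (what is proved, stated in full; the proofs are below) =====
def Claim_equal_split_top : Prop := ∀ (expr : String) (ops : List String), Dom_split_top expr ops → Spec_split_top expr ops (split_top expr ops)

-- ===== LEMMAS AND PROOFS =====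

-- suffix bracket depths (what A's incremental counters and B's mask pass hold)
def pvSuffP (e : List Char) (k : Nat) : Int :=
  (PySem.List.count (e.drop k) ')' : Int) - (PySem.List.count (e.drop k) '(' : Int)
def pvSuffB (e : List Char) (k : Nat) : Int :=
  (PySem.List.count (e.drop k) ']' : Int) - (PySem.List.count (e.drop k) '[' : Int)

-- proof-side first-match over the operator list at end position i (A's inner loop)
def pvFind1 (e : List Char) (n i : Nat) : List (List Char) → Option (Nat × Nat × List Char)
  | [] => none
  | op :: rest =>
    let L := op.length
    if L ≤ i + 1 ∧ PySem.Chars.upper (PySem.List.slice e (some ((i : Int) - L + 1)) (some ((i : Int) + 1))) = op then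
      let start := i + 1 - L
      let before : Option Char := if 1 ≤ start then e[start - 1]? else none
      let after : Option Char := if i + 1 < n then e[i + 1]? else none
      if ¬ (pvIdOpt before = true ∨ pvIdOpt after = true ∨ before = some ':' ∨ after = some ':') then
        some (start, i, op)
      else pvFind1 e n i rest
    else pvFind1 e n i rest

-- per-index candidate of A's scan
def pvC (e : List Char) (S : List (List Char)) (i : Nat) : Option (Nat × Nat × List Char) :=
  let ch := e.getD i ' '
  if ch = ')' ∨ ch = '(' ∨ ch = ']' ∨ ch = '[' then none
  else if pvSuffP e (i + 1) = 0 ∧ pvSuffB e (i + 1) = 0 then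
    pvFind1 e e.length i S
  else none

theorem pvFind1_fst (e : List Char) (n i : Nat) (S : List (List Char)) (c : Nat × Nat × List Char)
    (h : pvFind1 e n i S = some c) : c.2.1 = i := by
  induction S with
  | nil => simp [pvFind1] at h
  | cons op rest ih =>
    simp only [pvFind1] at h
    split_ifs at h <;> first
      | (injection h with h'; subst h'; rfl)
      | exact ih h

theorem pvBdy_iff (bf af : Option Char) :
    ((if pvIdOpt bf then false
      else if pvIdOpt af then false
      else if bf == some ':' || af == some ':' then false else true) = true)
      ↔ ¬ (pvIdOpt bf = true ∨ pvIdOpt af = true ∨ bf = some ':' ∨ af = some ':') := by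
  split_ifs with u1 u2 u3 <;> simp_all

theorem pvFindOpA_eq (e : List Char) (i : Nat) (S : List (List Char)) :
    pvFindOpA e i S = Option.map (fun c => (c.1, c.2.2)) (pvFind1 e e.length i S) := by
  induction S with
  | nil => simp [pvFindOpA, pvFind1]
  | cons op rest ih =>
    have hafter : (if i + 1 < e.length then e[i + 1]? else none) = e[i + 1]? := by
      split_ifs with h
      · rfl
      · exact (List.getElem?_eq_none (by omega)).symm
    have hb := pvBdy_iff (if 1 ≤ i + 1 - op.length then e[i + 1 - op.length - 1]? else none) e[i + 1]?
    simp only [pvFindOpA, pvFind1, pvIsBoundaryA, hafter]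
    by_cases hP : op.length ≤ i + 1 ∧
        PySem.Chars.upper (PySem.List.slice e (some ((i : Int) - op.length + 1)) (some ((i : Int) + 1))) = op
    · by_cases hQ : (pvIdOpt (if 1 ≤ i + 1 - op.length then e[i + 1 - op.length - 1]? else none) = true ∨
          pvIdOpt e[i + 1]? = true ∨
          (if 1 ≤ i + 1 - op.length then e[i + 1 - op.length - 1]? else none) = some ':' ∨
          e[i + 1]? = some ':')
      · rw [if_neg (fun hc => (hb.mp hc.2.2) hQ), if_pos hP, if_neg (not_not_intro hQ)]
        exact ih
      · rw [if_pos ⟨hP.1, hP.2, hb.mpr hQ⟩, if_pos hP, if_pos hQ]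
        rfl
    · rw [if_neg (fun hc => hP ⟨hc.1, hc.2.1⟩), if_neg hP]
      exact ih

theorem pvSuffP_succ (e : List Char) (k : Nat) (hk : k < e.length) :
    pvSuffP e k = pvSuffP e (k + 1) + (if e[k] = ')' then 1 else 0) - (if e[k] = '(' then 1 else 0) := by
  unfold pvSuffP
  rw [List.drop_eq_getElem_cons hk]
  simp only [PySem.List.count, List.count_cons]
  split_ifs <;> simp_all <;> ring

theorem pvSuffB_succ (e : List Char) (k : Nat) (hk : k < e.length) :
    pvSuffB e k = pvSuffB e (k + 1) + (if e[k] = ']' then 1 else 0) - (if e[k] = '[' then 1 else 0) := by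
  unfold pvSuffB
  rw [List.drop_eq_getElem_cons hk]
  simp only [PySem.List.count, List.count_cons]
  split_ifs <;> simp_all <;> ring

-- A's loop computes the backward first-match of pvC, mapped through the result builder
theorem pvGoA_eq (e : List Char) (ops : List (List Char)) :
    ∀ k, k ≤ e.length →
    pvGoA e ops (pvSuffP e k) (pvSuffB e k) k =
      Option.map (fun c => pvMkResA e c.1 c.2.1 c.2.2)
        (List.findSome? (pvC e (PySem.List.sorted ops (fun op => op.length) true)) (List.range k).reverse) := by
  intro k
  induction k with
  | zero => intro _; simp [pvGoA]
  | succ k ih =>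
    intro hk
    have hk' : k < e.length := by omega
    have ihk := ih (by omega)
    have hget : e.getD k ' ' = e[k] := List.getD_eq_getElem e ' ' hk'
    have hrange : (List.range (k + 1)).reverse = k :: (List.range k).reverse := by
      rw [List.range_succ]; simp
    have hP := pvSuffP_succ e k hk'
    have hB := pvSuffB_succ e k hk'
    rw [hrange, List.findSome?_cons]
    by_cases h1 : e[k] = ')'
    · have hC : pvC e (PySem.List.sorted ops (fun op => op.length) true) k = none := by
        unfold pvC; rw [hget, if_pos (Or.inl h1)]
      have eP : pvSuffP e (k + 1) + 1 = pvSuffP e k := by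
        rw [hP, if_pos h1, if_neg (by simp [h1])]; omega
      have eB : pvSuffB e (k + 1) = pvSuffB e k := by
        rw [hB, if_neg (by simp [h1]), if_neg (by simp [h1])]; omega
      simp only [pvGoA, hget, if_pos h1]
      rw [eP, eB, hC]
      exact ihk
    · by_cases h2 : e[k] = '('
      · have hC : pvC e (PySem.List.sorted ops (fun op => op.length) true) k = none := by
          unfold pvC; rw [hget, if_pos (Or.inr (Or.inl h2))]
        have eP : pvSuffP e (k + 1) - 1 = pvSuffP e k := by
          rw [hP, if_neg h1, if_pos h2]; omega
        have eB : pvSuffB e (k + 1) = pvSuffB e k := by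
          rw [hB, if_neg (by simp [h2]), if_neg (by simp [h2])]; omega
        simp only [pvGoA, hget, if_neg h1, if_pos h2]
        rw [eP, eB, hC]
        exact ihk
      · by_cases h3 : e[k] = ']'
        · have hC : pvC e (PySem.List.sorted ops (fun op => op.length) true) k = none := by
            unfold pvC; rw [hget, if_pos (Or.inr (Or.inr (Or.inl h3)))]
          have eP : pvSuffP e (k + 1) = pvSuffP e k := by
            rw [hP, if_neg h1, if_neg h2]; omega
          have eB : pvSuffB e (k + 1) + 1 = pvSuffB e k := by
            rw [hB, if_pos h3, if_neg (by simp [h3])]; omega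
          simp only [pvGoA, hget, if_neg h1, if_neg h2, if_pos h3]
          rw [eP, eB, hC]
          exact ihk
        · by_cases h4 : e[k] = '['
          · have hC : pvC e (PySem.List.sorted ops (fun op => op.length) true) k = none := by
              unfold pvC; rw [hget, if_pos (Or.inr (Or.inr (Or.inr h4)))]
            have eP : pvSuffP e (k + 1) = pvSuffP e k := by
              rw [hP, if_neg h1, if_neg h2]; omega
            have eB : pvSuffB e (k + 1) - 1 = pvSuffB e k := by
              rw [hB, if_neg h3, if_pos h4]; omega
            simp only [pvGoA, hget, if_neg h1, if_neg h2, if_neg h3, if_pos h4]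
            rw [eP, eB, hC]
            exact ihk
          · -- non-bracket position: the depths pass through unchanged
            have eP : pvSuffP e (k + 1) = pvSuffP e k := by
              rw [hP, if_neg h1, if_neg h2]; omega
            have eB : pvSuffB e (k + 1) = pvSuffB e k := by
              rw [hB, if_neg h3, if_neg h4]; omega
            have hCdef : pvC e (PySem.List.sorted ops (fun op => op.length) true) k =
                (if pvSuffP e (k + 1) = 0 ∧ pvSuffB e (k + 1) = 0 then
                  pvFind1 e e.length k (PySem.List.sorted ops (fun op => op.length) true) else none) := by
              unfold pvC
              rw [hget, if_neg (by tauto)]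
            simp only [pvGoA, hget, if_neg h1, if_neg h2, if_neg h3, if_neg h4]
            by_cases hd : pvSuffP e (k + 1) = 0 ∧ pvSuffB e (k + 1) = 0
            · rw [if_pos hd] at hCdef
              rw [if_pos hd]
              rw [pvFindOpA_eq, hCdef]
              cases hFB : pvFind1 e e.length k (PySem.List.sorted ops (fun op => op.length) true) with
              | none =>
                simp only [Option.map_none]
                rw [eP, eB]
                exact ihk
              | some c =>
                have := pvFind1_fst e e.length k _ c hFB
                simp only [Option.map_some]
                rw [this]
            · rw [if_neg hd]
              rw [if_neg hd] at hCdef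
              rw [hCdef, eP, eB]
              exact ihk

-- ===== B-side lemmas =====

def pvBracket (c : Char) : Bool := c = ')' || c = '(' || c = ']' || c = '['

def pvMaskAt (e : List Char) (i : Nat) : Bool :=
  !pvBracket (e.getD i ' ') && decide (pvSuffP e (i + 1) = 0) && decide (pvSuffB e (i + 1) = 0)

theorem pvMaskGo_eq (e : List Char) :
    ∀ k, k ≤ e.length → ∀ acc,
    pvMaskGo e k (pvSuffP e k) (pvSuffB e k) acc = ((List.range k).map (pvMaskAt e)) ++ acc := by
  intro k
  induction k with
  | zero => intro _ acc; simp [pvMaskGo]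
  | succ k ih =>
    intro hk acc
    have hk' : k < e.length := by omega
    have hget : e.getD k ' ' = e[k] := List.getD_eq_getElem e ' ' hk'
    have hP := pvSuffP_succ e k hk'
    have hB := pvSuffB_succ e k hk'
    have hrange : (List.range (k + 1)).map (pvMaskAt e) ++ acc
        = (List.range k).map (pvMaskAt e) ++ (pvMaskAt e k :: acc) := by
      rw [List.range_succ]; simp
    rw [hrange]
    by_cases h1 : e[k] = ')'
    · have hm : pvMaskAt e k = false := by unfold pvMaskAt pvBracket; rw [hget]; simp [h1]
      have eP : pvSuffP e (k + 1) + 1 = pvSuffP e k := by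
        rw [hP, if_pos h1, if_neg (by simp [h1])]; omega
      have eB : pvSuffB e (k + 1) = pvSuffB e k := by
        rw [hB, if_neg (by simp [h1]), if_neg (by simp [h1])]; omega
      simp only [pvMaskGo, hget, if_pos h1]
      rw [eP, eB, ← hm]
      exact ih (by omega) _
    · by_cases h2 : e[k] = '('
      · have hm : pvMaskAt e k = false := by unfold pvMaskAt pvBracket; rw [hget]; simp [h2]
        have eP : pvSuffP e (k + 1) - 1 = pvSuffP e k := by
          rw [hP, if_neg h1, if_pos h2]; omega
        have eB : pvSuffB e (k + 1) = pvSuffB e k := by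
          rw [hB, if_neg (by simp [h2]), if_neg (by simp [h2])]; omega
        simp only [pvMaskGo, hget, if_neg h1, if_pos h2]
        rw [eP, eB, ← hm]
        exact ih (by omega) _
      · by_cases h3 : e[k] = ']'
        · have hm : pvMaskAt e k = false := by unfold pvMaskAt pvBracket; rw [hget]; simp [h3]
          have eP : pvSuffP e (k + 1) = pvSuffP e k := by
            rw [hP, if_neg h1, if_neg h2]; omega
          have eB : pvSuffB e (k + 1) + 1 = pvSuffB e k := by
            rw [hB, if_pos h3, if_neg (by simp [h3])]; omega
          simp only [pvMaskGo, hget, if_neg h1, if_neg h2, if_pos h3]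
          rw [eP, eB, ← hm]
          exact ih (by omega) _
        · by_cases h4 : e[k] = '['
          · have hm : pvMaskAt e k = false := by unfold pvMaskAt pvBracket; rw [hget]; simp [h4]
            have eP : pvSuffP e (k + 1) = pvSuffP e k := by
              rw [hP, if_neg h1, if_neg h2]; omega
            have eB : pvSuffB e (k + 1) - 1 = pvSuffB e k := by
              rw [hB, if_neg h3, if_pos h4]; omega
            simp only [pvMaskGo, hget, if_neg h1, if_neg h2, if_neg h3, if_pos h4]
            rw [eP, eB, ← hm]
            exact ih (by omega) _
          · have hm : (decide (pvSuffP e (k + 1) = 0) && decide (pvSuffB e (k + 1) = 0)) = pvMaskAt e k := by unfold pvMaskAt pvBracket; rw [hget]; simp [h1, h2, h3, h4]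
            have eP : pvSuffP e (k + 1) = pvSuffP e k := by
              rw [hP, if_neg h1, if_neg h2]; omega
            have eB : pvSuffB e (k + 1) = pvSuffB e k := by
              rw [hB, if_neg h3, if_neg h4]; omega
            simp only [pvMaskGo, hget, if_neg h1, if_neg h2, if_neg h3, if_neg h4]
            rw [hm, eP, eB]
            exact ih (by omega) _

theorem pvMask_getD (e : List Char) (i : Nat) (hi : i < e.length) :
    (pvMaskGo e e.length 0 0 []).getD i false = pvMaskAt e i := by
  have h0P : pvSuffP e e.length = 0 := by
    unfold pvSuffP; rw [List.drop_length]; simp [PySem.List.count]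
  have h0B : pvSuffB e e.length = 0 := by
    unfold pvSuffB; rw [List.drop_length]; simp [PySem.List.count]
  have hmm := pvMaskGo_eq e e.length le_rfl []
  rw [h0P, h0B] at hmm
  rw [hmm, List.append_nil]
  simp [List.getD_eq_getElem?_getD, hi]

-- B's full qualification predicate at end position i for operator op
def pvQ (e E : List Char) (top : List Bool) (op : List Char) (i : Nat) : Bool :=
  (decide (op.length ≤ i + 1) && top.getD i false &&
    PySem.Chars.startswith (E.drop (i + 1 - op.length)) op) && pvBdyB e (i + 1 - op.length) i

def pvBi : Option (Nat × Nat × List Char) → Int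
  | none => -1
  | some (_, i, _) => (i : Int)

theorem pvScanOp_eq (e E : List Char) (top : List Bool) (op : List Char) :
    ∀ rem i best,
    pvScanOp e E top op i best rem =
      match ((List.range' i rem).filter (pvQ e E top op)).getLast? with
      | none => best
      | some jm => if pvBi best < (jm : Int) then some (jm + 1 - op.length, jm, op) else best := by
  intro rem
  induction rem with
  | zero => intro i best; simp [pvScanOp]
  | succ rem ih =>
    intro i best
    rw [List.range'_succ]
    by_cases hq : pvQ e E top op i = true
    · have hq' := hq
      simp only [pvQ, Bool.and_eq_true, decide_eq_true_eq] at hq'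
      have hC : op.length ≤ i + 1 ∧ top.getD i false = true ∧
          PySem.Chars.startswith (E.drop (i + 1 - op.length)) op = true :=
        ⟨hq'.1.1.1, hq'.1.1.2, hq'.1.2⟩
      have hbdy : pvBdyB e (i + 1 - op.length) i = true := hq'.2
      have hfil : (i :: List.range' (i + 1) rem).filter (pvQ e E top op)
          = i :: (List.range' (i + 1) rem).filter (pvQ e E top op) := by
        rw [List.filter_cons, if_pos hq]
      have hbest' : (match best with
            | none => some (i + 1 - op.length, i, op)
            | some (_, bi, _) => if bi < i then some (i + 1 - op.length, i, op) else best)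
          = if pvBi best < (i : Int) then some (i + 1 - op.length, i, op) else best := by
        match best with
        | none =>
          rw [if_pos (show pvBi none < (i : Int) by show (-1 : Int) < (i : Int); omega)]
        | some (s, bi, o) =>
          simp only [pvBi]
          by_cases hlt : bi < i
          · rw [if_pos hlt, if_pos (by exact_mod_cast hlt)]
          · rw [if_neg hlt, if_neg (by exact_mod_cast hlt)]
      simp only [pvScanOp, if_pos hC, hbdy, if_true, hbest', hfil, ih]
      cases hF : ((List.range' (i + 1) rem).filter (pvQ e E top op)).getLast? with
      | none =>
        rw [List.getLast?_eq_none_iff.mp hF]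
        simp only [List.getLast?_singleton]
      | some jm =>
        have hmem := List.mem_of_getLast? hF
        have hjm : i < jm := by
          have h2 := List.mem_range'_1.mp (List.mem_filter.mp hmem).1
          omega
        have hconsLast : (i :: (List.range' (i + 1) rem).filter (pvQ e E top op)).getLast? = some jm := by
          cases hcase : (List.range' (i + 1) rem).filter (pvQ e E top op) with
          | nil => rw [hcase] at hF; simp at hF
          | cons x xs => rw [hcase] at hF; rw [List.getLast?_cons_cons]; exact hF
        rw [hconsLast]
        dsimp only
        by_cases hbi : pvBi best < (i : Int)
        · rw [if_pos hbi]
          have hred : pvBi (some (i + 1 - op.length, i, op)) = (i : Int) := rfl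
          rw [hred, if_pos (show (i : Int) < (jm : Int) by exact_mod_cast hjm),
            if_pos (lt_trans hbi (show (i : Int) < (jm : Int) by exact_mod_cast hjm))]
        · rw [if_neg hbi]
    · have hfil : ((i :: List.range' (i + 1) rem).filter (pvQ e E top op))
          = (List.range' (i + 1) rem).filter (pvQ e E top op) := by
        rw [List.filter_cons, if_neg hq]
      have hqf : pvQ e E top op i = false := by
        revert hq; cases pvQ e E top op i <;> simp
      have hbest' : (if op.length ≤ i + 1 ∧ top.getD i false = true ∧
            PySem.Chars.startswith (E.drop (i + 1 - op.length)) op = true then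
            if pvBdyB e (i + 1 - op.length) i then
              (match best with
               | none => some (i + 1 - op.length, i, op)
               | some (_, bi, _) => if bi < i then some (i + 1 - op.length, i, op) else best)
            else best
          else best) = best := by
        by_cases hCc : op.length ≤ i + 1 ∧ top.getD i false = true ∧
            PySem.Chars.startswith (E.drop (i + 1 - op.length)) op = true
        · rw [if_pos hCc]
          have hbdy : pvBdyB e (i + 1 - op.length) i = false := by
            by_contra hcon
            have hbt : pvBdyB e (i + 1 - op.length) i = true := by
              revert hcon; cases pvBdyB e (i + 1 - op.length) i <;> simp
            have hqt : pvQ e E top op i = true := by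
              simp only [pvQ, Bool.and_eq_true, decide_eq_true_eq]
              exact ⟨⟨⟨hCc.1, hCc.2.1⟩, hCc.2.2⟩, hbt⟩
            rw [hqt] at hqf
            exact absurd hqf (by simp)
          simp [hbdy]
        · rw [if_neg hCc]
      simp only [pvScanOp, hbest', hfil, ih]

-- the staged selection both programs compute: rightmost index, first operator there
def pvSel (e E : List Char) (top : List Bool) (P : List (List Char)) : Option (Nat × Nat × List Char) :=
  List.findSome? (fun i => (P.find? (fun op => pvQ e E top op i)).map (fun op => (i + 1 - op.length, i, op)))
    (List.range e.length).reverse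

-- generic facts about a backward scan findSome? over range n, and the last filtered index
theorem pv_fs_rev_succ {α : Type} (g : Nat → Option α) (n : Nat) :
    List.findSome? g (List.range (n + 1)).reverse = (g n).or (List.findSome? g (List.range n).reverse) := by
  rw [List.range_succ]
  simp only [List.reverse_append, List.reverse_singleton, List.singleton_append]
  cases h : g n <;> simp [h]

theorem pv_fs_congr {α : Type} (g g' : Nat → Option α) :
    ∀ n, (∀ i, i < n → g i = g' i) →
    List.findSome? g (List.range n).reverse = List.findSome? g' (List.range n).reverse := by
  intro n
  induction n with
  | zero => intro _; rfl
  | succ n ih =>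
    intro h
    rw [pv_fs_rev_succ, pv_fs_rev_succ, h n (by omega), ih (fun i hi => h i (by omega))]

theorem pv_fs_none_elim {α : Type} (g : Nat → Option α) :
    ∀ n, List.findSome? g (List.range n).reverse = none → ∀ i, i < n → g i = none := by
  intro n
  induction n with
  | zero => intro _ i hi; omega
  | succ n ih =>
    intro h i hi
    rw [pv_fs_rev_succ] at h
    cases hg : g n with
    | some w => rw [hg, Option.some_or] at h; exact absurd h (by simp)
    | none =>
      rw [hg, Option.none_or] at h
      by_cases hin : i = n
      · subst hin; exact hg
      · exact ih h i (by omega)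

theorem pv_fs_some {α : Type} (g : Nat → Option α) (v : α) :
    ∀ n i, i < n → g i = some v → (∀ j, i < j → j < n → g j = none) →
    List.findSome? g (List.range n).reverse = some v := by
  intro n
  induction n with
  | zero => intro i hi; omega
  | succ n ih =>
    intro i hi hg hafter
    rw [pv_fs_rev_succ]
    by_cases hin : i = n
    · subst hin; rw [hg]; rfl
    · rw [hafter n (by omega) (by omega), Option.none_or]
      exact ih i (by omega) hg (fun j h1 h2 => hafter j h1 (by omega))

theorem pv_fs_elim {α : Type} (g : Nat → Option α) (v : α) :
    ∀ n, List.findSome? g (List.range n).reverse = some v →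
    ∃ i, i < n ∧ g i = some v ∧ ∀ j, i < j → j < n → g j = none := by
  intro n
  induction n with
  | zero => intro h; exact absurd h (by simp)
  | succ n ih =>
    intro h
    rw [pv_fs_rev_succ] at h
    cases hg : g n with
    | some w =>
      rw [hg, Option.some_or] at h
      exact ⟨n, by omega, by rw [hg, h], fun j h1 h2 => by omega⟩
    | none =>
      rw [hg, Option.none_or] at h
      obtain ⟨i, h1, h2, h3⟩ := ih h
      refine ⟨i, by omega, h2, fun j hj1 hj2 => ?_⟩
      by_cases hjn : j = n
      · subst hjn; exact hg
      · exact h3 j hj1 (by omega)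

theorem pv_lastFilter_none (p : Nat → Bool) (n : Nat) :
    ((List.range n).filter p).getLast? = none ↔ ∀ j, j < n → p j = false := by
  rw [List.getLast?_eq_none_iff, List.filter_eq_nil_iff]
  constructor
  · intro h j hj
    have := h j (List.mem_range.mpr hj)
    revert this; cases p j <;> simp
  · intro h x hx
    simp [h x (List.mem_range.mp hx)]

theorem pv_lastFilter_some (p : Nat → Bool) :
    ∀ n jm, (((List.range n).filter p).getLast? = some jm ↔
      (jm < n ∧ p jm = true ∧ ∀ j, jm < j → j < n → p j = false)) := by
  intro n
  induction n with
  | zero => intro jm; simp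
  | succ n ih =>
    intro jm
    rw [List.range_succ, List.filter_append]
    by_cases hp : p n = true
    · have hfs : List.filter p [n] = [n] := by simp [hp]
      rw [hfs, List.getLast?_concat]
      constructor
      · intro h
        have hjm : n = jm := by injection h
        subst hjm
        exact ⟨by omega, hp, fun j h1 h2 => by omega⟩
      · rintro ⟨h1, h2, h3⟩
        by_cases hjn : jm = n
        · subst hjn; rfl
        · exfalso
          have := h3 n (by omega) (by omega)
          rw [hp] at this
          exact absurd this (by simp)
    · have hp' : p n = false := by revert hp; cases p n <;> simp
      have hfs : List.filter p [n] = [] := by simp [hp']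
      rw [hfs, List.append_nil, ih]
      constructor
      · rintro ⟨h1, h2, h3⟩
        refine ⟨by omega, h2, fun j hj1 hj2 => ?_⟩
        by_cases hjn : j = n
        · subst hjn; exact hp'
        · exact h3 j hj1 (by omega)
      · rintro ⟨h1, h2, h3⟩
        have hjmn : jm ≠ n := fun hh => by rw [hh, hp'] at h2; exact absurd h2 (by simp)
        exact ⟨by omega, h2, fun j hj1 hj2 => h3 j hj1 (by omega)⟩

-- the step: scanning one more operator extends the selection
theorem pvStep (e E : List Char) (top : List Bool) (P : List (List Char)) (op : List Char) :
    pvScanOp e E top op 0 (pvSel e E top P) e.length = pvSel e E top (P ++ [op]) := by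
  have hrr : List.range' 0 e.length = List.range e.length := (List.range_eq_range').symm
  rw [pvScanOp_eq, hrr]
  cases hF : ((List.range e.length).filter (pvQ e E top op)).getLast? with
  | none =>
    have hnone := (pv_lastFilter_none (pvQ e E top op) e.length).mp hF
    unfold pvSel
    apply pv_fs_congr
    intro i hi
    show (P.find? (fun op' => pvQ e E top op' i)).map (fun op' => (i + 1 - op'.length, i, op'))
        = ((P ++ [op]).find? (fun op' => pvQ e E top op' i)).map (fun op' => (i + 1 - op'.length, i, op'))
    have hsing : List.find? (fun op' => pvQ e E top op' i) [op] = none := by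
      simp [List.find?, hnone i hi]
    rw [List.find?_append, hsing, Option.or_none]
  | some jm =>
    obtain ⟨hjml, hjq, hjafter⟩ := (pv_lastFilter_some (pvQ e E top op) e.length jm).mp hF
    cases hP : pvSel e E top P with
    | none =>
      dsimp only
      rw [show pvBi none = (-1 : Int) from rfl, if_pos (show (-1 : Int) < (jm : Int) by omega)]
      symm
      apply pv_fs_some _ _ e.length jm hjml
      · show ((P ++ [op]).find? (fun op' => pvQ e E top op' jm)).map (fun op' => (jm + 1 - op'.length, jm, op'))
            = some (jm + 1 - op.length, jm, op)
        have h1 : List.find? (fun op' => pvQ e E top op' jm) P = none :=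
          Option.map_eq_none_iff.mp (pv_fs_none_elim _ e.length hP jm hjml)
        rw [List.find?_append, h1, Option.none_or]
        simp [List.find?, hjq]
      · intro j h1 h2
        show ((P ++ [op]).find? (fun op' => pvQ e E top op' j)).map (fun op' => (j + 1 - op'.length, j, op')) = none
        have hp1 : List.find? (fun op' => pvQ e E top op' j) P = none :=
          Option.map_eq_none_iff.mp (pv_fs_none_elim _ e.length hP j h2)
        rw [List.find?_append, hp1, Option.none_or]
        simp [List.find?, hjafter j h1 h2]
    | some v =>
      obtain ⟨i0, hi0, hg0, hafter0⟩ := pv_fs_elim _ v e.length hP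
      obtain ⟨op0, hfind0, hmk0⟩ := Option.map_eq_some_iff.mp hg0
      have hbiv : pvBi (some v) = (i0 : Int) := by rw [← hmk0]; rfl
      dsimp only
      by_cases hlt : i0 < jm
      · rw [if_pos (by rw [hbiv]; exact_mod_cast hlt)]
        symm
        apply pv_fs_some _ _ e.length jm hjml
        · show ((P ++ [op]).find? (fun op' => pvQ e E top op' jm)).map (fun op' => (jm + 1 - op'.length, jm, op'))
              = some (jm + 1 - op.length, jm, op)
          have h1 : List.find? (fun op' => pvQ e E top op' jm) P = none :=
            Option.map_eq_none_iff.mp (hafter0 jm hlt hjml)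
          rw [List.find?_append, h1, Option.none_or]
          simp [List.find?, hjq]
        · intro j hj1 hj2
          show ((P ++ [op]).find? (fun op' => pvQ e E top op' j)).map (fun op' => (j + 1 - op'.length, j, op')) = none
          have h1 : List.find? (fun op' => pvQ e E top op' j) P = none :=
            Option.map_eq_none_iff.mp (hafter0 j (by omega) hj2)
          rw [List.find?_append, h1, Option.none_or]
          simp [List.find?, hjafter j hj1 hj2]
      · rw [if_neg (by rw [hbiv]; exact_mod_cast hlt)]
        symm
        apply pv_fs_some _ _ e.length i0 hi0
        · show ((P ++ [op]).find? (fun op' => pvQ e E top op' i0)).map (fun op' => (i0 + 1 - op'.length, i0, op')) = some v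
          rw [List.find?_append, hfind0, Option.some_or]
          simp [hmk0]
        · intro j hj1 hj2
          show ((P ++ [op]).find? (fun op' => pvQ e E top op' j)).map (fun op' => (j + 1 - op'.length, j, op')) = none
          have h1 : List.find? (fun op' => pvQ e E top op' j) P = none :=
            Option.map_eq_none_iff.mp (hafter0 j hj1 hj2)
          rw [List.find?_append, h1, Option.none_or]
          simp [List.find?, hjafter j (by omega) hj2]

theorem pvFoldOps_eq (e E : List Char) (top : List Bool) :
    ∀ S P, pvFoldOps e E top S (pvSel e E top P) = pvSel e E top (P ++ S) := by
  intro S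
  induction S with
  | nil => intro P; simp [pvFoldOps]
  | cons op rest ih =>
    intro P
    show pvFoldOps e E top rest (pvScanOp e E top op 0 (pvSel e E top P) e.length) = _
    rw [pvStep, ih]
    simp

-- B's boundary test as the negated disjunction A-side pvFind1 uses
theorem pvBdyB_iff (e : List Char) (s i : Nat) :
    pvBdyB e s i = true ↔ ¬ (pvIdOpt (if 1 ≤ s then e[s - 1]? else none) = true ∨
      pvIdOpt (if i + 1 < e.length then e[i + 1]? else none) = true ∨
      (if 1 ≤ s then e[s - 1]? else none) = some ':' ∨
      (if i + 1 < e.length then e[i + 1]? else none) = some ':') := by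
  simp [pvBdyB, not_or]
  tauto

-- at a masked (top-level, non-bracket) position, B's first operator match is A's
theorem pvQ_find_eq_pvFind1 (e : List Char) (i : Nat) (hi : i < e.length)
    (hmask : pvMaskAt e i = true) :
    ∀ S : List (List Char),
    (S.find? (fun op => pvQ e (PySem.Chars.upper e) (pvMaskGo e e.length 0 0 []) op i)).map
        (fun op => (i + 1 - op.length, i, op)) = pvFind1 e e.length i S := by
  intro S
  induction S with
  | nil => simp [pvFind1]
  | cons op rest ih =>
    have htop : (pvMaskGo e e.length 0 0 []).getD i false = true := by
      rw [pvMask_getD e i hi]; exact hmask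
    by_cases hL : op.length ≤ i + 1
    · have hslice : PySem.List.slice e (some ((i : Int) - op.length + 1)) (some ((i : Int) + 1))
          = (e.drop (i + 1 - op.length)).take op.length := by
        have h1 : ((i : Int) - op.length + 1) = (((i + 1 - op.length : Nat)) : Int) := by omega
        have h2 : ((i : Int) + 1) = (((i + 1 : Nat)) : Int) := by omega
        rw [h1, h2, PySem.List.slice_natCast]
        congr 1
        omega
      have hupper : PySem.Chars.upper ((e.drop (i + 1 - op.length)).take op.length)
          = ((PySem.Chars.upper e).drop (i + 1 - op.length)).take op.length := by
        show ((e.drop (i + 1 - op.length)).take op.length).map PySem.Chars.upperChar = _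
        rw [List.map_take, List.map_drop]
        rfl
      have hmatch : (PySem.Chars.startswith ((PySem.Chars.upper e).drop (i + 1 - op.length)) op = true)
          ↔ PySem.Chars.upper (PySem.List.slice e (some ((i : Int) - op.length + 1)) (some ((i : Int) + 1))) = op := by
        rw [PySem.Chars.startswith_iff, List.prefix_iff_eq_take, hslice, hupper]
        exact eq_comm
      by_cases hM : PySem.Chars.upper (PySem.List.slice e (some ((i : Int) - op.length + 1)) (some ((i : Int) + 1))) = op
      · by_cases hbdy : pvBdyB e (i + 1 - op.length) i = true
        · have hq : pvQ e (PySem.Chars.upper e) (pvMaskGo e e.length 0 0 []) op i = true := by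
            simp only [pvQ, Bool.and_eq_true, decide_eq_true_eq]
            exact ⟨⟨⟨hL, htop⟩, hmatch.mpr hM⟩, hbdy⟩
          have hqb : (fun op' => pvQ e (PySem.Chars.upper e) (pvMaskGo e e.length 0 0 []) op' i) op = true := hq
          rw [List.find?_cons_of_pos (p := fun op' => pvQ e (PySem.Chars.upper e) (pvMaskGo e e.length 0 0 []) op' i) (a := op) (l := rest) hqb]
          have hbdyProp := (pvBdyB_iff e (i + 1 - op.length) i).mp hbdy
          simp only [pvFind1]
          rw [if_pos ⟨hL, hM⟩, if_pos hbdyProp]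
          rfl
        · have hbf : pvBdyB e (i + 1 - op.length) i = false := by
            revert hbdy; cases pvBdyB e (i + 1 - op.length) i <;> simp
          have hq : ¬ pvQ e (PySem.Chars.upper e) (pvMaskGo e e.length 0 0 []) op i = true := by
            simp [pvQ, hbf]
          have hqb : ¬ (fun op' => pvQ e (PySem.Chars.upper e) (pvMaskGo e e.length 0 0 []) op' i) op = true := hq
          rw [List.find?_cons_of_neg (p := fun op' => pvQ e (PySem.Chars.upper e) (pvMaskGo e e.length 0 0 []) op' i) (a := op) (l := rest) (by simpa using hqb)]
          have hdisj : (pvIdOpt (if 1 ≤ i + 1 - op.length then e[i + 1 - op.length - 1]? else none) = true ∨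
              pvIdOpt (if i + 1 < e.length then e[i + 1]? else none) = true ∨
              (if 1 ≤ i + 1 - op.length then e[i + 1 - op.length - 1]? else none) = some ':' ∨
              (if i + 1 < e.length then e[i + 1]? else none) = some ':') := by
            by_contra hcon
            rw [(pvBdyB_iff e (i + 1 - op.length) i).mpr hcon] at hbf
            exact absurd hbf (by simp)
          simp only [pvFind1]
          rw [if_pos ⟨hL, hM⟩, if_neg (not_not_intro hdisj)]
          exact ih
      · have hq : ¬ pvQ e (PySem.Chars.upper e) (pvMaskGo e e.length 0 0 []) op i = true := by
          intro h
          simp only [pvQ, Bool.and_eq_true, decide_eq_true_eq] at h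
          exact hM (hmatch.mp h.1.2)
        have hqb : ¬ (fun op' => pvQ e (PySem.Chars.upper e) (pvMaskGo e e.length 0 0 []) op' i) op = true := hq
        rw [List.find?_cons_of_neg (p := fun op' => pvQ e (PySem.Chars.upper e) (pvMaskGo e e.length 0 0 []) op' i) (a := op) (l := rest) (by simpa using hqb)]
        simp only [pvFind1]
        rw [if_neg (fun hc => hM hc.2)]
        exact ih
    · have hq : ¬ pvQ e (PySem.Chars.upper e) (pvMaskGo e e.length 0 0 []) op i = true := by
        intro h
        simp only [pvQ, Bool.and_eq_true, decide_eq_true_eq] at h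
        exact hL h.1.1.1
      have hqb : ¬ (fun op' => pvQ e (PySem.Chars.upper e) (pvMaskGo e e.length 0 0 []) op' i) op = true := hq
      rw [List.find?_cons_of_neg (p := fun op' => pvQ e (PySem.Chars.upper e) (pvMaskGo e e.length 0 0 []) op' i) (a := op) (l := rest) (by simpa using hqb)]
      simp only [pvFind1]
      rw [if_neg (fun hc => hL hc.1)]
      exact ih

theorem pvSel_eq_pvC (e : List Char) (S : List (List Char)) :
    pvSel e (PySem.Chars.upper e) (pvMaskGo e e.length 0 0 []) S =
      List.findSome? (pvC e S) (List.range e.length).reverse := by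
  unfold pvSel
  apply pv_fs_congr
  intro i hi
  by_cases hmask : pvMaskAt e i = true
  · have hmask' := hmask
    simp only [pvMaskAt, Bool.and_eq_true, Bool.not_eq_true', decide_eq_true_eq] at hmask'
    have hbr : ¬ (e.getD i ' ' = ')' ∨ e.getD i ' ' = '(' ∨ e.getD i ' ' = ']' ∨ e.getD i ' ' = '[') := by
      have hb := hmask'.1.1
      simp only [pvBracket, Bool.or_eq_false_iff, decide_eq_false_iff_not] at hb
      tauto
    have hc : pvC e S i = pvFind1 e e.length i S := by
      unfold pvC
      rw [if_neg hbr, if_pos ⟨hmask'.1.2, hmask'.2⟩]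
    rw [hc]
    exact pvQ_find_eq_pvFind1 e i hi hmask S
  · have htop : (pvMaskGo e e.length 0 0 []).getD i false = false := by
      rw [pvMask_getD e i hi]
      revert hmask; cases pvMaskAt e i <;> simp
    have hfind : S.find? (fun op => pvQ e (PySem.Chars.upper e) (pvMaskGo e e.length 0 0 []) op i) = none := by
      rw [List.find?_eq_none]
      intro op _
      simp only [pvQ, htop, Bool.and_false, Bool.false_and, Bool.not_eq_true]
    show (S.find? (fun op => pvQ e (PySem.Chars.upper e) (pvMaskGo e e.length 0 0 []) op i)).map
        (fun op => (i + 1 - op.length, i, op)) = pvC e S i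
    rw [hfind]
    have hmf : pvMaskAt e i = false := by
      revert hmask; cases pvMaskAt e i <;> simp
    unfold pvC
    by_cases hbr : e.getD i ' ' = ')' ∨ e.getD i ' ' = '(' ∨ e.getD i ' ' = ']' ∨ e.getD i ' ' = '['
    · rw [if_pos hbr]; rfl
    · rw [if_neg hbr]
      have hnb : pvBracket (e.getD i ' ') = false := by
        simp only [pvBracket, Bool.or_eq_false_iff, decide_eq_false_iff_not]
        tauto
      have hsf : ¬ (pvSuffP e (i + 1) = 0 ∧ pvSuffB e (i + 1) = 0) := by
        intro hs
        have : pvMaskAt e i = true := by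
          unfold pvMaskAt
          rw [hnb, hs.1, hs.2]
          simp
        rw [this] at hmf
        exact absurd hmf (by simp)
      rw [if_neg hsf]
      rfl

-- ===== VERDICT (by name: the statement is the Claim_ definition above) =====
theorem split_top_spec : Claim_equal_split_top := by
  intro expr ops _
  unfold Spec_split_top split_top split_top_alt
  have hdrop : expr.toList.drop expr.toList.length = [] := List.drop_length
  have h0P : pvSuffP expr.toList expr.toList.length = 0 := by
    unfold pvSuffP; rw [hdrop]; simp [PySem.List.count]
  have h0B : pvSuffB expr.toList expr.toList.length = 0 := by
    unfold pvSuffB; rw [hdrop]; simp [PySem.List.count]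
  dsimp only
  have hA := pvGoA_eq expr.toList (ops.map String.toList) expr.toList.length le_rfl
  rw [h0P, h0B] at hA
  have hsel0 : pvSel expr.toList (PySem.Chars.upper expr.toList) (pvMaskGo expr.toList expr.toList.length 0 0 []) [] = none := by
    unfold pvSel; simp
  have hB := pvFoldOps_eq expr.toList (PySem.Chars.upper expr.toList)
      (pvMaskGo expr.toList expr.toList.length 0 0 [])
      (PySem.List.sorted (ops.map String.toList) (fun op => op.length) true) []
  rw [hsel0] at hB
  rw [hA, hB, List.nil_append, pvSel_eq_pvC]
  cases List.findSome? (pvC expr.toList (PySem.List.sorted (ops.map String.toList) (fun op => op.length) true))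
      (List.range expr.toList.length).reverse with
  | none => rfl
  | some c =>
    obtain ⟨s, j, op⟩ := c
    rfl
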